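-- pv_equiv track=rewrite | github.com/ninuxi/audio-ai-projects | 01-fundamentals/week6-production-systems/database/database_schema_manager.py | _get_migration_path
-- ===== SOURCE A (Python) =====
-- from typing import Dict, Any, List, Optional, Union
--
-- def _get_migration_path(from_version: str, to_version: str) -> List[str]:
--     """Get migration path between versions"""
--
--     # Define available migrations
--     migrations = {
--         "0.0.0": ["1.0.0"],
--         "1.0.0": ["1.1.0"],
--         "1.1.0": ["2.0.0"]
--     }
--
--     # Simple linear migration path
--     path = []
--     current = from_version
--
--     while current != to_version and current in migrations:
--         next_versions = migrations[current]
--         if to_version in next_versions: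
--             path.append(f"migrate_{current}_to_{to_version}")
--             break
--         else:
--             # Take first available migration
--             next_version = next_versions[0]
--             path.append(f"migrate_{current}_to_{next_version}")
--             current = next_version
--
--     return path if current == to_version or to_version in migrations.get(current, []) else []
-- ===== SOURCE B (Python) =====
-- def _get_migration_path(from_version: str, to_version: str) -> list:
--     """Get migration path between versions (linear chain, table-driven)."""
--     if from_version == to_version:
--         return []
--     order = ["0.0.0", "1.0.0", "1.1.0", "2.0.0"]
--     if from_version in order and to_version in order:
--         i = order.index(from_version)
--         j = order.index(to_version)
--         if i < j:
--             return [f"migrate_{order[k]}_to_{order[k+1]}" for k in range(i, j)]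
--     return []
-- ===== Notes on version B (the rewrite author's own statement) =====
-- stated objective: simpler
-- what changed: Replaces the while-loop graph walk with break and a tail membership guard by a direct index computation on the precomputed linear chain list and a comprehension over the index range.
import Mathlib
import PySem

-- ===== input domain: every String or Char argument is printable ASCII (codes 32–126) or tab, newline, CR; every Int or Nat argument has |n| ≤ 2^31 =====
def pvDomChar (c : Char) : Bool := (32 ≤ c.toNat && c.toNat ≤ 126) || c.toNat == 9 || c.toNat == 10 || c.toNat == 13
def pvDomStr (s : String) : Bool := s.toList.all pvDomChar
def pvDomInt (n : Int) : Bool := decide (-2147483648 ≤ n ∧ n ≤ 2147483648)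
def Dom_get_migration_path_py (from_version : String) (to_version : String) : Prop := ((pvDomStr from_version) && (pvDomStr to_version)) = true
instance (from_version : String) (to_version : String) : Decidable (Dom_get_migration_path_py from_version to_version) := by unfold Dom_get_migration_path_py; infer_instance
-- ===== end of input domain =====

-- B replaces A's while-loop walk over the migration graph by index arithmetic on the
-- precomputed linear chain (objective: simpler).

-- ===== PORT A =====
-- the `migrations` dict literal
def pvMigrationsA : PySem.Dict String (List String) :=
  PySem.Dict.ofList [("0.0.0", ["1.0.0"]), ("1.0.0", ["1.1.0"]), ("1.1.0", ["2.0.0"])]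

-- the while loop; returns (current, path).  fuel 4 > number of dict keys is never exhausted:
-- each non-break iteration moves `current` one step along the strictly forward chain.
def pvLoopA : Nat → String → String → List String → String × List String
  | 0, current, _, path => (current, path)
  | fuel + 1, current, to_version, path =>
    if current ≠ to_version ∧ ((pvMigrationsA.get? current).isSome) then
      let next_versions := (pvMigrationsA.get? current).getD []
      if to_version ∈ next_versions then
        (current, path ++ ["migrate_" ++ current ++ "_to_" ++ to_version])
      else
        -- next_versions[0]; every value list in pvMigrationsA is nonempty, so headD is exact
        let next_version := next_versions.headD ""
        pvLoopA fuel next_version to_version (path ++ ["migrate_" ++ current ++ "_to_" ++ next_version])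
    else (current, path)

def get_migration_path_py (from_version : String) (to_version : String) : List String :=
  let r := pvLoopA 4 from_version to_version []
  if r.1 == to_version || to_version ∈ pvMigrationsA.getD r.1 [] then r.2 else []

-- ===== PORT B =====
def pvOrderB : List String := ["0.0.0", "1.0.0", "1.1.0", "2.0.0"]

def get_migration_path_py_alt (from_version : String) (to_version : String) : List String :=
  if from_version == to_version then []
  else if from_version ∈ pvOrderB ∧ to_version ∈ pvOrderB then
    let i := ((PySem.List.index? pvOrderB from_version).getD 0 : Nat)
    let j := ((PySem.List.index? pvOrderB to_version).getD 0 : Nat)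
    if i < j then
      (PySem.List.pyRange (i : Int) (j : Int) 1).map (fun k =>
        "migrate_" ++ PySem.List.pyGetD pvOrderB k "" ++ "_to_" ++ PySem.List.pyGetD pvOrderB (k + 1) "")
    else []
  else []

-- ===== PRECONDITION & SPEC =====
def Spec_get_migration_path_py (from_version : String) (to_version : String) (out : List String) : Prop := out = get_migration_path_py_alt from_version to_version
instance (from_version : String) (to_version : String) (out : List String) : Decidable (Spec_get_migration_path_py from_version to_version out) := by unfold Spec_get_migration_path_py; infer_instance

-- ===== CLAIM (what is proved, stated in full; the proofs are below) =====
def Claim_equal_get_migration_path_py : Prop := ∀ (from_version : String) (to_version : String), Dom_get_migration_path_py from_version to_version → Spec_get_migration_path_py from_version to_version (get_migration_path_py from_version to_version)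

-- ===== LEMMAS AND PROOFS =====
theorem pvGet0 : pvMigrationsA.get? "0.0.0" = some ["1.0.0"] := by decide
theorem pvGet1 : pvMigrationsA.get? "1.0.0" = some ["1.1.0"] := by decide
theorem pvGet2 : pvMigrationsA.get? "1.1.0" = some ["2.0.0"] := by decide
theorem pvGet3 : pvMigrationsA.get? "2.0.0" = none := by decide

theorem pvGetNone (f : String) (h0 : f ≠ "0.0.0") (h1 : f ≠ "1.0.0") (h2 : f ≠ "1.1.0") :
    pvMigrationsA.get? f = none := by
  have hmk : pvMigrationsA = PySem.Dict.mk [("0.0.0",["1.0.0"]),("1.0.0",["1.1.0"]),("1.1.0",["2.0.0"])] := by decide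
  rw [hmk]
  simp [Ne.symm h0, Ne.symm h1, Ne.symm h2, PySem.Dict.get?]

-- B returns [] when to_version is outside the chain
theorem pvAltNoneT (f t : String) (t0 : t ≠ "0.0.0") (t1 : t ≠ "1.0.0") (t2 : t ≠ "1.1.0") (t3 : t ≠ "2.0.0") :
    get_migration_path_py_alt f t = [] := by
  simp [get_migration_path_py_alt, pvOrderB, t0, t1, t2, t3]

-- B returns [] when from_version is outside the chain
theorem pvAltNoneF (f t : String) (h0 : f ≠ "0.0.0") (h1 : f ≠ "1.0.0") (h2 : f ≠ "1.1.0") (h3 : f ≠ "2.0.0") :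
    get_migration_path_py_alt f t = [] := by
  simp [get_migration_path_py_alt, pvOrderB, h0, h1, h2, h3]

-- A returns [] when to_version is outside the chain (for each possible concrete from_version,
-- and for from_version outside the chain)
theorem pvANoneT (c t : String) (hc : c = "0.0.0" ∨ c = "1.0.0" ∨ c = "1.1.0" ∨ c = "2.0.0")
    (t0 : t ≠ "0.0.0") (t1 : t ≠ "1.0.0") (t2 : t ≠ "1.1.0") (t3 : t ≠ "2.0.0") :
    get_migration_path_py c t = [] := by
  rcases hc with rfl | rfl | rfl | rfl <;>
    simp [get_migration_path_py, pvLoopA, pvGet0, pvGet1, pvGet2, pvGet3,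
      PySem.Dict.getD_eq_get?_getD, Ne.symm t0, Ne.symm t1, Ne.symm t2, Ne.symm t3, t0, t1, t2, t3]

theorem pvANoneF (f t : String) (h0 : f ≠ "0.0.0") (h1 : f ≠ "1.0.0") (h2 : f ≠ "1.1.0") (he : f ≠ t) :
    get_migration_path_py f t = [] := by
  simp [get_migration_path_py, pvLoopA, pvGetNone f h0 h1 h2, PySem.Dict.getD_eq_get?_getD, he]

theorem pv_main (f t : String) : get_migration_path_py f t = get_migration_path_py_alt f t := by
  by_cases e : f = t
  · subst e
    simp [get_migration_path_py, get_migration_path_py_alt, pvLoopA]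
  · by_cases f0 : f = "0.0.0" <;> by_cases f1 : f = "1.0.0" <;> by_cases f2 : f = "1.1.0" <;>
      by_cases f3 : f = "2.0.0" <;>
      by_cases t0 : t = "0.0.0" <;> by_cases t1 : t = "1.0.0" <;> by_cases t2 : t = "1.1.0" <;>
      by_cases t3 : t = "2.0.0" <;>
      first
        | exact absurd (f0 ▸ f1) (by decide)
        | exact absurd (f0 ▸ f2) (by decide)
        | exact absurd (f0 ▸ f3) (by decide)
        | exact absurd (f1 ▸ f2) (by decide)
        | exact absurd (f1 ▸ f3) (by decide)
        | exact absurd (f2 ▸ f3) (by decide)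
        | exact absurd (t0 ▸ t1) (by decide)
        | exact absurd (t0 ▸ t2) (by decide)
        | exact absurd (t0 ▸ t3) (by decide)
        | exact absurd (t1 ▸ t2) (by decide)
        | exact absurd (t1 ▸ t3) (by decide)
        | exact absurd (t2 ▸ t3) (by decide)
        | (subst_vars; exact absurd rfl e)
        | (subst_vars; decide)
        | (rw [pvANoneT f t (by subst_vars; simp) t0 t1 t2 t3, pvAltNoneT f t t0 t1 t2 t3])
        | (rw [pvANoneF f t f0 f1 f2 e, pvAltNoneF f t f0 f1 f2 f3])

-- ===== VERDICT (by name: the statement is the Claim_ definition above) =====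
theorem get_migration_path_py_spec : Claim_equal_get_migration_path_py := by
  intro f t _
  exact pv_main f t
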